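-- pv_equiv track=rewrite | github.com/voussoir/reddit | TitleNames/titlenames.py | breakpoint
-- ===== SOURCE A (Python) =====
-- import string
--
-- BREAKPOINTS = ["'"]
--
-- CHARS = string.digits + string.ascii_letters + '-_'
--
-- def breakpoint(word):
--     newword = ''
--     for c in word:
--         if c in CHARS:
--             newword += c
--         if c in BREAKPOINTS:
--             break
--     return newword
-- ===== SOURCE B (Python) =====
-- import string
--
-- BREAKPOINTS = ["'"]
--
-- CHARS = string.digits + string.ascii_letters + '-_'
--
-- def breakpoint(word):
--     idx = word.find("'")
--     prefix = word if idx == -1 else word[:idx]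
--     return ''.join(c for c in prefix if c in CHARS)
-- ===== Notes on version B (the rewrite author's own statement) =====
-- stated objective: alternative
-- what changed: Replaces the single scan with an embedded break by a two-phase structure: first locate the boundary with str.find on the quote breakpoint character, then filter the allowed characters out of that prefix slice.
import Mathlib
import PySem

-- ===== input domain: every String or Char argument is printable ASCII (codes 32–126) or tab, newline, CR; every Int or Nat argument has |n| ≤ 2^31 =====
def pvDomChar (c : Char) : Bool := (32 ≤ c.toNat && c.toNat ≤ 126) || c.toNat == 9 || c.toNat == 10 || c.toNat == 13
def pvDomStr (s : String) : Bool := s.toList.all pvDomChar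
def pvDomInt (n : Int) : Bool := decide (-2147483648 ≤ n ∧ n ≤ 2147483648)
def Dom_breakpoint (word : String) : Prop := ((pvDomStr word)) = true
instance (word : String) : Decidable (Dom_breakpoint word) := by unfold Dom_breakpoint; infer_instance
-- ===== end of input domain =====

-- B replaces A's single scan with an embedded break by a two-phase find-the-boundary-then-filter structure (alternative decomposition, same cost).

-- ===== PORT A =====
-- CHARS = string.digits + string.ascii_letters + '-_' (chars of the string; 'c in CHARS' for a single char c is exactly list membership)
def pvCHARS : List Char :=
  "0123456789abcdefghijklmnopqrstuvwxyzABCDEFGHIJKLMNOPQRSTUVWXYZ-_".toList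

-- BREAKPOINTS = ["'"] ; 'c in BREAKPOINTS' is membership of the one-char string, i.e. c = '\''
def pvBREAKPOINTS : List Char := ['\'']

-- the for-loop with its break, over the characters, accumulating newword
def breakpointGo : List Char → List Char → List Char
  | [], acc => acc
  | c :: rest, acc =>
    let acc' := if c ∈ pvCHARS then acc ++ [c] else acc
    if c ∈ pvBREAKPOINTS then acc' else breakpointGo rest acc'

def breakpoint (word : String) : String :=
  String.ofList (breakpointGo word.toList [])

-- ===== PORT B =====
def breakpoint_alt (word : String) : String :=
  let idx := PySem.Str.find word "'"
  let pre := if idx == -1 then word.toList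
             else PySem.List.slice word.toList none (some idx)
  String.ofList (pre.filter (fun c => c ∈ pvCHARS))

-- ===== PRECONDITION & SPEC =====
def Spec_breakpoint (word : String) (out : String) : Prop := out = breakpoint_alt word
instance (word : String) (out : String) : Decidable (Spec_breakpoint word out) := by unfold Spec_breakpoint; infer_instance

-- ===== CLAIM (what is proved, stated in full; the proofs are below) =====
def Claim_equal_breakpoint : Prop := ∀ (word : String), Dom_breakpoint word → Spec_breakpoint word (breakpoint word)

-- ===== LEMMAS AND PROOFS =====

-- A's scan is: filter CHARS over the prefix strictly before the first quote
theorem breakpointGo_eq (l acc : List Char) :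
    breakpointGo l acc
      = acc ++ (l.takeWhile (fun x => !(x == '\''))).filter (fun c => decide (c ∈ pvCHARS)) := by
  induction l generalizing acc with
  | nil => simp [breakpointGo]
  | cons c rest ih =>
    by_cases hq : c = '\''
    · subst hq
      have h1 : '\'' ∈ pvBREAKPOINTS := by decide
      have h2 : ¬ ('\'' ∈ pvCHARS) := by decide
      simp [breakpointGo, h1, h2]
    · have hb : ¬ (c ∈ pvBREAKPOINTS) := by simpa [pvBREAKPOINTS] using hq
      simp only [breakpointGo, if_neg hb, ih]
      by_cases hc : c ∈ pvCHARS
      · simp [hc, List.takeWhile_cons, List.filter_cons, hq]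
      · simp [hc, List.takeWhile_cons, List.filter_cons, hq]

-- take at the first-occurrence index = takeWhile (· ≠ q)
theorem take_eq_takeWhile (q : Char) (l : List Char) (n : Nat)
    (hlt : ∀ i, (h : i < l.length) → i < n → l[i] ≠ q)
    (hstop : n = l.length ∨ (∃ h : n < l.length, l[n] = q)) :
    l.take n = l.takeWhile (fun x => !(x == q)) := by
  induction l generalizing n with
  | nil => simp
  | cons c rest ih =>
    cases n with
    | zero =>
      rcases hstop with h | ⟨h, hq⟩
      · simp at h
      · simp only [List.getElem_cons_zero] at hq
        simp [List.takeWhile_cons, hq]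
    | succ m =>
      have hc : c ≠ q := hlt 0 (by simp) (by omega)
      rw [List.take_succ_cons, List.takeWhile_cons]
      have hcb : (!(c == q)) = true := by simp [hc]
      rw [hcb]
      simp only [if_true]
      congr 1
      apply ih
      · intro i h hi
        exact hlt (i + 1) (by simpa using Nat.succ_lt_succ h) (by omega)
      · rcases hstop with h | ⟨h, hq⟩
        · left; simpa using h
        · right
          refine ⟨by simpa using Nat.lt_of_succ_lt_succ h, ?_⟩
          simpa using hq

theorem singleton_prefix_drop (l : List Char) (q : Char) (i : Nat) (h : i < l.length) :
    [q] <+: l.drop i ↔ l[i] = q := by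
  rw [List.drop_eq_getElem_cons h]
  constructor
  · rintro ⟨t, ht⟩
    simp only [List.cons_append, List.nil_append] at ht
    injection ht with h1 _
    exact h1.symm
  · intro he
    exact ⟨l.drop (i + 1), by simp [he]⟩

theorem takeWhile_ne_of_not_mem (q : Char) (l : List Char) (h : q ∉ l) :
    l.takeWhile (fun x => !(x == q)) = l := by
  induction l with
  | nil => rfl
  | cons c rest ih =>
    have hc : c ≠ q := by intro hx; exact h (hx ▸ List.mem_cons_self)
    rw [List.takeWhile_cons]
    have hcb : (!(c == q)) = true := by simp [hc]
    rw [hcb]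
    simp only [if_true]
    rw [ih (fun hm => h (List.mem_cons_of_mem _ hm))]

-- ===== VERDICT (by name: the statement is the Claim_ definition above) =====
theorem breakpoint_spec : Claim_equal_breakpoint := by
  intro word _
  unfold Spec_breakpoint breakpoint breakpoint_alt
  rw [breakpointGo_eq]
  simp only [List.nil_append]
  by_cases hfind : PySem.Str.find word "'" = -1
  · have hnin : '\'' ∉ word.toList := by
      intro hmem
      have hinf : ("'".toList) <:+: word.toList := by
        obtain ⟨s, t, hst⟩ := List.append_of_mem hmem
        exact ⟨s, t, by simpa using hst.symm⟩
      exact (PySem.Str.find_eq_neg_one_iff word "'").mp hfind hinf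
    rw [if_pos (by simpa using hfind)]
    rw [takeWhile_ne_of_not_mem _ _ hnin]
  · have hfc : PySem.Str.find word "'" = PySem.Chars.find word.toList "'".toList := by
      simp [PySem.Str.find_eq]
    have hge : 0 ≤ PySem.Str.find word "'" := by
      have h1 := PySem.Chars.neg_one_le_find word.toList "'".toList
      rw [hfc]
      omega
    rw [if_neg (by simpa using hfind)]
    set f := PySem.Str.find word "'" with hf
    have hspec := PySem.Chars.find_spec (s := word.toList) (sub := "'".toList)
      (by rw [← hfc]; exact hge)
    obtain ⟨hpre, hmin⟩ := hspec
    rw [← hfc] at hpre hmin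
    have hq1 : "'".toList = ['\''] := rfl
    rw [hq1] at hpre hmin
    have hlen : f.toNat < word.toList.length := by
      by_contra hle
      push_neg at hle
      rw [List.drop_eq_nil_of_le hle] at hpre
      exact absurd (List.prefix_nil.mp hpre) (by simp)
    have hsl : PySem.List.slice word.toList none (some f) = word.toList.take f.toNat :=
      PySem.List.slice_to _ hge
    have heq : word.toList.take f.toNat = word.toList.takeWhile (fun x => !(x == '\'')) := by
      apply take_eq_takeWhile
      · intro i h hi
        have hni := hmin i hi
        rw [singleton_prefix_drop word.toList '\'' i h] at hni
        simpa using hni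
      · right
        refine ⟨hlen, ?_⟩
        exact (singleton_prefix_drop word.toList '\'' f.toNat hlen).mp (by simpa using hpre)
    rw [hsl, heq]
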